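-- pv_equiv track=rewrite | github.com/Fzkuji/Research-Agent-Harness | research_harness/stages/review/review_corpus/pipeline/extract_sentence_templates.py | _looks_useful
-- ===== SOURCE A (Python) =====
-- def _looks_useful(s: str) -> bool:
--     if len(s) < 25 or len(s) > 350:
--         return False
--     if s.count("[") > 2 or s.count("(") > 4:
--         return False
--     alpha = [c for c in s if c.isalpha()]
--     if alpha and sum(1 for c in alpha if c.isupper()) / len(alpha) > 0.4:
--         return False
--     return True
-- ===== SOURCE B (Python) =====
-- def _looks_useful(s: str) -> bool:
--     n = brackets = parens = alpha = upper = 0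
--     for c in s:
--         n += 1
--         if c == '[':
--             brackets += 1
--         elif c == '(':
--             parens += 1
--         elif c.isalpha():
--             alpha += 1
--             if c.isupper():
--                 upper += 1
--     if n < 25 or n > 350:
--         return False
--     if brackets > 2 or parens > 4:
--         return False
--     if alpha and upper / alpha > 0.4:
--         return False
--     return True
-- ===== Notes on version B (the rewrite author's own statement) =====
-- stated objective: alternative
-- what changed: Replaces A's four separate linear passes (len, two str.count scans, a filter list build plus an upper-count generator) by a single character loop accumulating five counters, then applies the same thresholds.
import Mathlib
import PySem

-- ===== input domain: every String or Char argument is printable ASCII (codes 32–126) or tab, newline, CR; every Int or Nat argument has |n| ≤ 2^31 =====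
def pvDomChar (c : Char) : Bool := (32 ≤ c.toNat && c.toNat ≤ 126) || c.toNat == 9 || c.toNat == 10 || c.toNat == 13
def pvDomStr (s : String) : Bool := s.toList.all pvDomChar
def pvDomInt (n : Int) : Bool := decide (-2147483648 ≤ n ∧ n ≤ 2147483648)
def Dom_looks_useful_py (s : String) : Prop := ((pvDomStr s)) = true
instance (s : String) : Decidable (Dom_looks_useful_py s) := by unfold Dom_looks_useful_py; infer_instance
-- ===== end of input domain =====

-- B fuses A's multiple passes (len, two str.count scans, filter + upper-sum) into one counting loop; same thresholds, same result.
-- The Python float comparison upper/alpha > 0.4 is ported in BOTH ports as 5*upper > 2*alpha, which is exact for alpha ≤ 350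
-- (the only reachable range, since len(s) ≤ 350 there; verified exhaustively over all 0 ≤ upper ≤ alpha ≤ 350 against CPython floats).


-- ===== PORT A =====
def looks_useful_py (s : String) : Bool :=
  if PySem.Str.len s < 25 || PySem.Str.len s > 350 then false
  else if PySem.Str.count s "[" > 2 || PySem.Str.count s "(" > 4 then false
  else
    let alpha := s.toList.filter PySem.Chars.isalpha
    -- sum(1 for c in alpha if c.isupper())
    let upper := alpha.foldl (fun acc c => if PySem.Chars.isupper c then acc + 1 else acc) (0 : Nat)
    -- upper / len(alpha) > 0.4 ported as 5*upper > 2*len(alpha): exact for len(alpha) ≤ 350 (checked exhaustively)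
    if !alpha.isEmpty && 5 * upper > 2 * alpha.length then false
    else true

-- ===== PORT B =====
-- the single pass of Source B: one fold over the characters maintaining (n, brackets, parens, alpha, upper)
def pvStepB (st : Nat × Nat × Nat × Nat × Nat) (c : Char) : Nat × Nat × Nat × Nat × Nat :=
  let (n, b, p, a, u) := st
  if c = '[' then (n + 1, b + 1, p, a, u)
  else if c = '(' then (n + 1, b, p + 1, a, u)
  else if PySem.Chars.isalpha c then
    if PySem.Chars.isupper c then (n + 1, b, p, a + 1, u + 1) else (n + 1, b, p, a + 1, u)
  else (n + 1, b, p, a, u)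

def looks_useful_py_alt (s : String) : Bool :=
  let (n, b, p, a, u) := s.toList.foldl pvStepB (0, 0, 0, 0, 0)
  if n < 25 || n > 350 then false
  else if b > 2 || p > 4 then false
  -- upper / alpha > 0.4 ported as 5*upper > 2*alpha: exact for alpha ≤ 350 (checked exhaustively)
  else if a ≠ 0 && 5 * u > 2 * a then false
  else true

-- ===== PRECONDITION & SPEC =====
def Spec_looks_useful_py (s : String) (out : Bool) : Prop := out = looks_useful_py_alt s
instance (s : String) (out : Bool) : Decidable (Spec_looks_useful_py s out) := by unfold Spec_looks_useful_py; infer_instance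

-- ===== CLAIM (what is proved, stated in full; the proofs are below) =====
def Claim_equal_looks_useful_py : Prop := ∀ (s : String), Dom_looks_useful_py s → Spec_looks_useful_py s (looks_useful_py s)

-- ===== LEMMAS AND PROOFS =====

-- B's fold computes length and the four counts
theorem foldl_pvStepB (l : List Char) (n b p a u : Nat) :
    l.foldl pvStepB (n, b, p, a, u) =
      (n + l.length, b + l.count '[', p + l.count '(',
       a + l.countP PySem.Chars.isalpha, u + l.countP (fun c => PySem.Chars.isalpha c && PySem.Chars.isupper c)) := by
  induction l generalizing n b p a u with
  | nil => simp
  | cons c t ih =>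
      simp only [List.foldl_cons, pvStepB]
      split_ifs with h1 h2 h3 h4
      · subst h1; rw [ih]
        have e : PySem.Chars.isalpha '[' = false := by decide
        simp [e]
        omega
      · subst h2; rw [ih]
        have e : PySem.Chars.isalpha '(' = false := by decide
        simp [e]
        omega
      · rw [ih]
        simp [h1, h2, h3, h4]
        omega
      · rw [ih]
        simp [h1, h2, h3, h4]
        omega
      · rw [ih]
        have e : PySem.Chars.isalpha c = false := by simpa using h3
        simp [h1, h2, e]
        omega

-- A's upper-sum loop is a countP
theorem foldl_upper (l : List Char) (acc : Nat) :
    l.foldl (fun acc c => if PySem.Chars.isupper c then acc + 1 else acc) acc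
      = acc + l.countP PySem.Chars.isupper := by
  induction l generalizing acc with
  | nil => simp
  | cons c t ih =>
      by_cases h : PySem.Chars.isupper c
      · simp [h, ih]; omega
      · simp [h, ih]

-- single-character Python str.count is List.count
theorem count_go_single (c : Char) : ∀ (fuel : Nat) (l : List Char) (acc : Nat),
    l.length ≤ fuel → PySem.Chars.count.go [c] fuel l acc = acc + l.count c := by
  intro fuel
  induction fuel with
  | zero =>
      intro l acc h
      have : l = [] := List.eq_nil_of_length_eq_zero (Nat.le_zero.mp h)
      subst this; simp [PySem.Chars.count.go]
  | succ f ih =>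
      intro l acc h
      cases l with
      | nil => simp [PySem.Chars.count.go]
      | cons x t =>
          rw [PySem.Chars.count.go]
          by_cases hx : x = c
          · subst hx
            have hp : [x].isPrefixOf (x :: t) = true := by simp [List.isPrefixOf]
            rw [if_pos hp]
            simp only [List.length_singleton, List.drop_one, List.tail_cons]
            rw [ih t (acc + 1) (by simpa using Nat.le_of_succ_le_succ h)]
            simp
            omega
          · have hp : [c].isPrefixOf (x :: t) = false := by
              simp [List.isPrefixOf]
              exact fun h' => absurd h'.symm hx
            rw [if_neg (by simp [hp])]
            rw [ih t acc (by simpa using Nat.le_of_succ_le_succ h)]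
            simp [hx]

theorem str_count_single (s sub : String) (c : Char) (h : sub.toList = [c]) :
    PySem.Str.count s sub = s.toList.count c := by
  have hgo := count_go_single c s.toList.length s.toList 0 le_rfl
  simp only [PySem.Str.count, PySem.Chars.count, h]
  simpa using hgo

-- ===== VERDICT (by name: the statement is the Claim_ definition above) =====
theorem looks_useful_py_spec : Claim_equal_looks_useful_py := by
  intro s _
  have hc1 := str_count_single s "[" '[' rfl
  have hc2 := str_count_single s "(" '(' rfl
  have hbe : ∀ l : List Char, (!l.isEmpty) = decide (l.length ≠ 0) := by
    intro l; cases l <;> simp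
  unfold Spec_looks_useful_py
  simp only [looks_useful_py, looks_useful_py_alt, foldl_pvStepB, foldl_upper,
             hc1, hc2, PySem.Str.len_eq, Nat.zero_add,
             List.countP_eq_length_filter, String.length_toList, hbe]
  have hlt : (decide ((s.length : Int) < 25)) = decide (s.length < 25) := by simp
  have hgt : (decide ((s.length : Int) > 350)) = decide (s.length > 350) := by simp
  simp only [hlt, hgt, List.filter_filter]
  have hco : (fun a => PySem.Chars.isupper a && PySem.Chars.isalpha a)
      = (fun c => PySem.Chars.isalpha c && PySem.Chars.isupper c) := by
    funext c; exact Bool.and_comm _ _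
  rw [hco]
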